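-- pv_equiv track=rewrite | github.com/AlexanderPerez11/INME4003_Projects | Hardy_Cross/HardyCross.py | find_shared_rows
-- ===== SOURCE A (Python) =====
-- def find_shared_rows(matrix, n):
--     # create a set to keep track of the shared values
--     shared_values = set(matrix[n])
--
--     # find the index of the rows that share a value with the fixed row index n
--     shared_rows = []
--     for i, row in enumerate(matrix):
--         if i == n:
--             continue
--         if any(value in shared_values for value in row):
--             shared_rows.append(i)
--
--     # return the result
--     if shared_rows:
--         return shared_rows
--     else:
--         return None
-- ===== SOURCE B (Python) =====
-- def find_shared_rows(matrix, n):
--     row_n = matrix[n]  # access first so an out-of-range n raises as in A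
--
--     # inverted index: value -> list of row indices containing it
--     index = {}
--     for i, row in enumerate(matrix):
--         for v in row:
--             index.setdefault(v, []).append(i)
--
--     # collect every row index sharing a value with row n, drop n itself
--     result = set()
--     for v in row_n:
--         result.update(index.get(v, []))
--     result.discard(n)
--
--     out = sorted(result)
--     return out if out else None
-- ===== Notes on version B (the rewrite author's own statement) =====
-- stated objective: alternative
-- what changed: Replaces A's per-row membership scan against set(matrix[n]) by first building an inverted index value->row-indices over the whole matrix, then unioning the index entries of row n's values into a set and sorting it.
import Mathlib
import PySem

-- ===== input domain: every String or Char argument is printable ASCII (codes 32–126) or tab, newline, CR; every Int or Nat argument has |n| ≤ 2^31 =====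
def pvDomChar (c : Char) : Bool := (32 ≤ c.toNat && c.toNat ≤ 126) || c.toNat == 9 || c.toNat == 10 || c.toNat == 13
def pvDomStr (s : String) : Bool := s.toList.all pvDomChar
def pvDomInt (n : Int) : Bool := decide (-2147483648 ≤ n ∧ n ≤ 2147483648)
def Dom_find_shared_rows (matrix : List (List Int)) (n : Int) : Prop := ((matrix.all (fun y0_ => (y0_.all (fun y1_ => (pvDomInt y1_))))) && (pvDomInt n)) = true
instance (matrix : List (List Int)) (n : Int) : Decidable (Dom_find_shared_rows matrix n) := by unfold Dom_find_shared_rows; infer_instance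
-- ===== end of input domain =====

-- B replaces A's per-row scan against set(matrix[n]) by an inverted index (value -> row indices)
-- whose entries for row n's values are unioned into a set and sorted; an alternative decomposition
-- of the same cost, proved to return the same value wherever A returns (Pre_ excludes the
-- IndexError of matrix[n]).

-- ===== PORT A =====
def find_shared_rows (matrix : List (List Int)) (n : Int) : Option (List Int) :=
  match PySem.List.pyGet? matrix n with
  | none => none  -- Python raises IndexError here; excluded by Pre_
  | some rowN =>
    let shared_values : PySem.Set Int := PySem.Set.ofList rowN
    let shared_rows : List Int :=
      (PySem.List.enumerate matrix).foldl
        (fun acc p =>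
          if p.1 = n then acc
          else if p.2.any (fun v => shared_values.contains v) then acc ++ [p.1]
          else acc) []
    if shared_rows ≠ [] then some shared_rows else none

-- ===== PORT B =====
def find_shared_rows_alt (matrix : List (List Int)) (n : Int) : Option (List Int) :=
  match PySem.List.pyGet? matrix n with
  | none => none  -- Python raises IndexError here; excluded by Pre_
  | some row_n =>
    let index : PySem.Dict Int (List Int) :=
      (PySem.List.enumerate matrix).foldl
        (fun d p => p.2.foldl (fun d v => d.modify v [] (fun l => l ++ [p.1])) d)
        PySem.Dict.empty
    let result : PySem.Set Int :=
      row_n.foldl (fun s v => PySem.Set.update s (index.getD v [])) PySem.Set.empty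
    let result2 := result.discard n
    let out := PySem.List.sorted result2 (fun x => x)
    if out ≠ [] then some out else none

-- ===== PRECONDITION & SPEC =====
-- Pre_ excludes exactly the inputs where matrix[n] raises IndexError (n out of range).
def Pre_find_shared_rows (matrix : List (List Int)) (n : Int) : Prop :=
  PySem.Raise.InRange matrix.length n
instance (matrix : List (List Int)) (n : Int) : Decidable (Pre_find_shared_rows matrix n) := by
  unfold Pre_find_shared_rows; infer_instance

def pvWitness_find_shared_rows : List (List Int) × Int := ([[1, 2], [3], [2, 5]], 0)

def Spec_find_shared_rows (matrix : List (List Int)) (n : Int) (out : Option (List Int)) : Prop := out = find_shared_rows_alt matrix n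
instance (matrix : List (List Int)) (n : Int) (out : Option (List Int)) : Decidable (Spec_find_shared_rows matrix n out) := by unfold Spec_find_shared_rows; infer_instance

-- ===== CLAIM (what is proved, stated in full; the proofs are below) =====
def Claim_equal_find_shared_rows : Prop := ∀ (matrix : List (List Int)) (n : Int), Dom_find_shared_rows matrix n → Pre_find_shared_rows matrix n → Spec_find_shared_rows matrix n (find_shared_rows matrix n)

-- ===== LEMMAS AND PROOFS =====

-- membership in an entry of the inverted index built by B's nested loop
theorem pv_mem_index (l : List (Int × List Int)) (d : PySem.Dict Int (List Int)) (v j : Int) :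
    j ∈ (l.foldl (fun d p => p.2.foldl (fun d u => d.modify u [] (fun xs => xs ++ [p.1])) d) d).getD v []
      ↔ j ∈ d.getD v [] ∨ ∃ p ∈ l, p.1 = j ∧ v ∈ p.2 := by
  induction l generalizing d with
  | nil => simp
  | cons p l ih =>
    simp only [List.foldl_cons, ih]
    have hinner : (p.2.foldl (fun d u => d.modify u [] (fun xs => xs ++ [p.1])) d).getD v []
        = d.getD v [] ++ ((p.2.map (fun u => (u, p.1))).filter (fun q => q.1 == v)).map (·.2) := by
      rw [← PySem.Dict.getD_foldl_modify_append (p.2.map (fun u => (u, p.1))) d v, List.foldl_map]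
    rw [hinner]
    simp only [List.mem_append, List.mem_map, List.mem_filter, List.mem_cons]
    constructor
    · rintro (⟨hd | ⟨q, ⟨⟨u, hu, rfl⟩, hq⟩, rfl⟩⟩ | ⟨q, hq, h1, h2⟩)
      · exact Or.inl hd
      · have huv : u = v := by simpa using hq
        exact Or.inr ⟨p, Or.inl rfl, rfl, huv ▸ hu⟩
      · exact Or.inr ⟨q, Or.inr hq, h1, h2⟩
    · rintro (hd | ⟨q, hq | hq, h1, h2⟩)
      · exact Or.inl (Or.inl hd)
      · subst hq
        exact Or.inl (Or.inr ⟨(v, j), ⟨⟨v, h2, by simp [h1]⟩, by simp⟩, rfl⟩)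
      · exact Or.inr ⟨q, hq, h1, h2⟩

-- membership in B's accumulated set of shared row indices
theorem pv_mem_collect (l : List Int) (s : PySem.Set Int) (f : Int → List Int) (j : Int) :
    j ∈ l.foldl (fun s v => PySem.Set.update s (f v)) s ↔ j ∈ s ∨ ∃ v ∈ l, j ∈ f v := by
  induction l generalizing s with
  | nil => simp
  | cons v l ih =>
    simp only [List.foldl_cons, ih, PySem.Set.mem_update, List.mem_cons]
    constructor
    · rintro (⟨hs | hf⟩ | ⟨u, hu, hj⟩)
      · exact Or.inl hs
      · exact Or.inr ⟨v, Or.inl rfl, hf⟩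
      · exact Or.inr ⟨u, Or.inr hu, hj⟩
    · rintro (hs | ⟨u, hu | hu, hj⟩)
      · exact Or.inl (Or.inl hs)
      · exact Or.inl (Or.inr (hu ▸ hj))
      · exact Or.inr ⟨u, hu, hj⟩

-- B's accumulated set has no duplicates
theorem pv_nodup_collect (l : List Int) (s : PySem.Set Int) (f : Int → List Int)
    (hs : List.Nodup s) : List.Nodup (l.foldl (fun s v => PySem.Set.update s (f v)) s) := by
  induction l generalizing s with
  | nil => exact hs
  | cons v l ih => exact ih _ (PySem.Set.nodup_update s (f v) hs)

-- ===== VERDICT (by name: the statement is the Claim_ definition above) =====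
theorem find_shared_rows_spec : Claim_equal_find_shared_rows := by
  intro matrix n _hdom hpre
  unfold Spec_find_shared_rows
  obtain ⟨rowN, hrow⟩ : ∃ r, PySem.List.pyGet? matrix n = some r := by
    cases h : PySem.List.pyGet? matrix n with
    | none => exact absurd ((PySem.List.pyGet?_eq_none_iff matrix n).mp h) (by exact fun hc => hc hpre)
    | some r => exact ⟨r, rfl⟩
  unfold find_shared_rows find_shared_rows_alt
  simp only [hrow]
  -- name the pieces
  set E := PySem.List.enumerate matrix with hE
  -- A's loop as a filter-map
  have hA : E.foldl
      (fun acc p => if p.1 = n then acc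
        else if p.2.any (fun v => (PySem.Set.ofList rowN).contains v) then acc ++ [p.1] else acc) []
      = (E.filter (fun p => decide (p.1 ≠ n) && p.2.any (fun v => (PySem.Set.ofList rowN).contains v))).map (·.1) := by
    rw [PySem.List.foldl_congr_mem E _
      (fun acc p => if (decide (p.1 ≠ n) && p.2.any (fun v => (PySem.Set.ofList rowN).contains v)) = true
        then acc ++ [p.1] else acc) []
      (by intro acc p _; by_cases h1 : p.1 = n <;> simp [h1])]
    exact PySem.List.foldl_append_if _ _ _ _
  rw [hA]
  set LA := (E.filter (fun p => decide (p.1 ≠ n) && p.2.any (fun v => (PySem.Set.ofList rowN).contains v))).map (·.1) with hLA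
  -- LA is strictly increasing
  have hpair : LA.Pairwise (· < ·) := by
    have hsub : LA.Sublist (E.map (·.1)) := List.Sublist.map _ List.filter_sublist
    have : (E.map (·.1)).Pairwise (· < ·) := by
      rw [hE, PySem.List.map_fst_enumerate]
      exact PySem.List.pairwise_lt_pyRange_one 0 (0 + matrix.length)
    exact this.sublist hsub
  have hndLA : LA.Nodup := hpair.imp (fun h => ne_of_lt h)
  -- B's final set
  set S := (rowN.foldl
      (fun s v => PySem.Set.update s
        ((E.foldl (fun d p => p.2.foldl (fun d u => d.modify u [] (fun xs => xs ++ [p.1])) d)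
          PySem.Dict.empty).getD v []))
      PySem.Set.empty).discard n with hS
  have hndS : S.Nodup := PySem.Set.nodup_discard _ n (pv_nodup_collect _ _ _ (by simp [PySem.Set.empty]))
  -- same membership
  have hmem : ∀ j, j ∈ LA ↔ j ∈ S := by
    intro j
    rw [hS, PySem.Set.mem_discard]
    rw [pv_mem_collect rowN PySem.Set.empty
      (fun v => (E.foldl (fun d p => p.2.foldl (fun d u => d.modify u [] (fun xs => xs ++ [p.1])) d)
        PySem.Dict.empty).getD v []) j]
    simp only [hLA, List.mem_map, List.mem_filter, Bool.and_eq_true, decide_eq_true_eq,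
      List.any_eq_true, PySem.Set.contains, PySem.Set.mem_ofList, PySem.Set.empty,
      pv_mem_index, PySem.Dict.getD_empty, List.not_mem_nil, false_or,
      List.contains_iff_mem]
    constructor
    · rintro ⟨p, ⟨hpE, hne, v, hv, hvN⟩, rfl⟩
      exact ⟨⟨v, hvN, p, hpE, rfl, hv⟩, hne⟩
    · rintro ⟨⟨v, hvN, p, hpE, rfl, hv⟩, hne⟩
      exact ⟨p, ⟨hpE, hne, v, hv, hvN⟩, rfl⟩
  -- sorting B's set yields A's list
  have hsorted : PySem.List.sorted S (fun x => x) = LA :=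
    PySem.List.sorted_eq_of_perm_of_pairwise_lt S LA (fun x => x)
      ((List.perm_ext_iff_of_nodup hndLA hndS).mpr hmem) hpair
  simp only [hsorted]
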